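-- pv_equiv track=rewrite | github.com/jeremy63s/Crackle-Gene | src/my_project/sequence_utils.py | parse_orf_frame
-- ===== SOURCE A (Python) =====
-- def parse_orf_frame(description):
--     """
--     From the description string (e.g.
--     "ID=Seq_ORF.1;ORF_type=complete;ORF_len=9;ORF_frame=1;Start:ATG;Stop:TAG")
--     extract and return the ORF frame as an integer (1, 2, or 3).
--     """
--     for part in description.split(';'):
--         if part.startswith("ORF_frame="):
--             try:
--                 return int(part.split('=')[1])
--             except ValueError:
--                 return None
--     return None
-- ===== SOURCE B (Python) =====
-- def parse_orf_frame(description):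
--     """
--     From the description string extract and return the ORF frame as an
--     integer, by parsing the whole description into a key->value dict
--     (first occurrence of each key wins) and looking up the ORF_frame key.
--     """
--     fields = {}
--     for part in description.split(';'):
--         if '=' in part:
--             fields.setdefault(part.split('=')[0], part.split('=')[1])
--     value = fields.get('ORF_frame')
--     if value is None:
--         return None
--     try:
--         return int(value)
--     except ValueError:
--         return None
-- ===== Notes on version B (the rewrite author's own statement) =====
-- stated objective: idiomatic
-- what changed: Instead of scanning the split parts for one prefixed field and returning early, B parses the whole description into a first-occurrence key->value dict and then looks up the ORF_frame key.
import Mathlib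
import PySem

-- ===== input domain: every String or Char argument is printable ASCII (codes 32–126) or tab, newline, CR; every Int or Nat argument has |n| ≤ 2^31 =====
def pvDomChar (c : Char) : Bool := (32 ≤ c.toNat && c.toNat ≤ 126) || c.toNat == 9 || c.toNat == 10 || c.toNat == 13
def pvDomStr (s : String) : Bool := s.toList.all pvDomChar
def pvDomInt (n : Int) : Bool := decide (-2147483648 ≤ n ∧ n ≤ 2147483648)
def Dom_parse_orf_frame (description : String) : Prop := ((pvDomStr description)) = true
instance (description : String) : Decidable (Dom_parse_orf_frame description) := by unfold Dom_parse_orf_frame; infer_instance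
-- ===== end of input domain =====

-- B (idiomatic): instead of scanning the parts for one prefixed field, B parses the whole
-- description into a first-occurrence key->value dict and looks up the ORF_frame key.

-- ===== PORT A =====
-- A's loop over the semicolon-split parts: return the int value of the first part carrying
-- the ORF_frame prefix (the except-ValueError branch = ofStr? returning none).
def pvLoopA : List String → Option Int
  | [] => none
  | p :: rest =>
    if PySem.Str.startswith p "ORF_frame=" then
      -- part.split('=')[1] is always in range here (the part contains '='), so pyGetD's
      -- default is unreachable; int(...) → PySem.Int.ofStr? (none = ValueError → None)
      PySem.Int.ofStr? (PySem.List.pyGetD ((PySem.Str.split? p "=").getD []) 1 "")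
    else pvLoopA rest

def parse_orf_frame (description : String) : Option Int :=
  pvLoopA ((PySem.Str.split? description ";").getD [])

-- ===== PORT B =====
-- one loop body of B: when the part contains an equals sign, setdefault its key to its value
def pvStep (d : PySem.Dict String String) (p : String) : PySem.Dict String String :=
  if PySem.Str.isIn "=" p then
    d.setdefault (PySem.List.pyGetD ((PySem.Str.split? p "=").getD []) 0 "")
                 (PySem.List.pyGetD ((PySem.Str.split? p "=").getD []) 1 "")
  else d

def parse_orf_frame_alt (description : String) : Option Int :=
  match (((PySem.Str.split? description ";").getD []).foldl pvStep PySem.Dict.empty).get? "ORF_frame" with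
  | none => none
  | some v => PySem.Int.ofStr? v

-- ===== PRECONDITION & SPEC =====
def Spec_parse_orf_frame (description : String) (out : Option Int) : Prop := out = parse_orf_frame_alt description
instance (description : String) (out : Option Int) : Decidable (Spec_parse_orf_frame description out) := by unfold Spec_parse_orf_frame; infer_instance

-- ===== CLAIM (what is proved, stated in full; the proofs are below) =====
def Claim_equal_parse_orf_frame : Prop := ∀ (description : String), Dom_parse_orf_frame description → Spec_parse_orf_frame description (parse_orf_frame description)

-- ===== LEMMAS AND PROOFS =====

-- head/tail view of splitting a char list at a single-character separator
def pvSplit1 (c : Char) : List Char → List Char × List (List Char)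
  | [] => ([], [])
  | x :: xs =>
    let r := pvSplit1 c xs
    if x = c then ([], r.1 :: r.2) else (x :: r.1, r.2)

theorem pvGo_eq (c : Char) : ∀ (fuel : Nat) (l cur : List Char) (acc : List (List Char)),
    l.length ≤ fuel →
    PySem.Chars.splitOn.go [c] fuel l cur acc
      = acc.reverse ++ (cur.reverse ++ (pvSplit1 c l).1) :: (pvSplit1 c l).2 := by
  intro fuel
  induction fuel with
  | zero =>
    intro l cur acc hl
    have : l = [] := List.length_eq_zero_iff.mp (Nat.le_zero.mp hl)
    subst this
    simp [PySem.Chars.splitOn.go, pvSplit1]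
  | succ f ih =>
    intro l cur acc hl
    cases l with
    | nil => simp [PySem.Chars.splitOn.go, pvSplit1]
    | cons x rest =>
      rw [PySem.Chars.splitOn.go]
      by_cases hx : x = c
      · subst hx
        have hpre : List.isPrefixOf [x] (x :: rest) = true := by simp [List.isPrefixOf]
        simp only [hpre, if_true, List.length_cons, List.drop_succ_cons, List.length_nil,
          List.drop_zero]
        rw [ih rest [] (cur.reverse :: acc) (by simpa using Nat.le_of_succ_le_succ hl)]
        simp [pvSplit1]
      · have hpre : List.isPrefixOf [c] (x :: rest) = false := by
          simp [List.isPrefixOf]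
          exact fun h => absurd h.symm hx
        simp only [hpre, Bool.false_eq_true, if_false]
        rw [ih rest (x :: cur) acc (by simpa using Nat.le_of_succ_le_succ hl)]
        simp [pvSplit1, hx]

theorem pvSplitOn_eq (c : Char) (cs : List Char) :
    PySem.Chars.splitOn cs [c] = (pvSplit1 c cs).1 :: (pvSplit1 c cs).2 := by
  unfold PySem.Chars.splitOn
  rw [pvGo_eq c (cs.length + 1) cs [] [] (Nat.le_succ _)]
  simp

-- the first split field equals k (with '=' present) iff the part starts with k ++ "="
theorem pvPrefix_iff (c : Char) : ∀ (p k : List Char), c ∉ k →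
    ((k ++ [c]) <+: p ↔ (c ∈ p ∧ (pvSplit1 c p).1 = k)) := by
  intro p
  induction p with
  | nil =>
    intro k _
    simp
  | cons x xs ih =>
    intro k hk
    cases k with
    | nil =>
      by_cases hx : x = c
      · subst hx
        simp [pvSplit1, List.cons_prefix_cons]
      · simp [pvSplit1, hx, List.cons_prefix_cons, Ne.symm hx]
    | cons a k' =>
      have hac : a ≠ c := by intro h; exact hk (by simp [h])
      have hk' : c ∉ k' := fun h => hk (by simp [h])
      by_cases hx : x = c
      · subst hx
        simp only [List.cons_append, List.cons_prefix_cons, pvSplit1]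
        constructor
        · rintro ⟨h, -⟩; exact absurd h hac
        · rintro ⟨-, h⟩
          simp at h
      · simp only [List.cons_append, List.cons_prefix_cons, pvSplit1, if_neg hx, List.mem_cons]
        rw [ih k' hk']
        constructor
        · rintro ⟨rfl, hm, hrest⟩; exact ⟨Or.inr hm, by simp [hrest]⟩
        · rintro ⟨hm, h⟩
          have h1 : x = a := by injection h
          have h2 : (pvSplit1 c xs).1 = k' := by injection h
          refine ⟨h1.symm, ?_, h2⟩
          rcases hm with hm | hm
          · exact absurd hm.symm hx
          · exact hm

-- per-part: A's guard holds iff B inserts under key "ORF_frame"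
theorem pvGuard_iff (p : String) :
    PySem.Str.startswith p "ORF_frame=" = true ↔
      (PySem.Str.isIn "=" p = true ∧
        PySem.List.pyGetD ((PySem.Str.split? p "=").getD []) 0 "" = "ORF_frame") := by
  have hsplit : (PySem.Str.split? p "=").getD []
      = (PySem.Chars.splitOn p.toList ['=']).map String.ofList := by
    simp [PySem.Str.split?, PySem.Chars.split?]
  have hfield0 : PySem.List.pyGetD ((PySem.Str.split? p "=").getD []) 0 ""
      = String.ofList (pvSplit1 '=' p.toList).1 := by
    rw [hsplit, pvSplitOn_eq]
    simp [PySem.List.pyGetD, PySem.List.pyGet?, PySem.List.pyIdx?]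
  have hsw : PySem.Str.startswith p "ORF_frame=" = true ↔
      ("ORF_frame".toList ++ ['=']) <+: p.toList := by
    rw [PySem.Str.startswith_eq, PySem.Chars.startswith_iff]
    constructor <;> (intro h; exact h)
  have hin : PySem.Str.isIn "=" p = true ↔ '=' ∈ p.toList := by
    rw [PySem.Str.isIn_iff_infix]
    exact List.singleton_infix_iff '=' p.toList
  rw [hsw, hfield0, hin,
    pvPrefix_iff '=' p.toList "ORF_frame".toList (by decide)]
  constructor
  · rintro ⟨h1, h2⟩
    refine ⟨h1, ?_⟩
    rw [h2]
    decide
  · rintro ⟨h1, h2⟩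
    exact ⟨h1, by simpa [String.toList_ofList] using congrArg String.toList h2⟩

-- B's key/value expressions, named for the loop lemmas
def pvKey (p : String) : String := PySem.List.pyGetD ((PySem.Str.split? p "=").getD []) 0 ""
def pvVal (p : String) : String := PySem.List.pyGetD ((PySem.Str.split? p "=").getD []) 1 ""

-- first ORF_frame value the dict loop would record
def pvScan : List String → Option String
  | [] => none
  | p :: r => if PySem.Str.isIn "=" p = true ∧ pvKey p = "ORF_frame" then some (pvVal p) else pvScan r

theorem pvFold_get : ∀ (parts : List String) (d : PySem.Dict String String),
    (parts.foldl pvStep d).get? "ORF_frame"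
      = match d.get? "ORF_frame" with
        | some v => some v
        | none => pvScan parts := by
  intro parts
  induction parts with
  | nil =>
    intro d
    cases h : d.get? "ORF_frame" <;> simp [pvScan, h]
  | cons p r ih =>
    intro d
    rw [List.foldl_cons, ih]
    by_cases hg : PySem.Str.isIn "=" p = true
    · have hgc : PySem.Chars.isIn ['='] p.toList = true := by simpa using hg
      have hstep : pvStep d p = d.setdefault (pvKey p) (pvVal p) := by
        unfold pvStep pvKey pvVal
        rw [hg]
        simp
      by_cases hkey : pvKey p = "ORF_frame"
      · rw [hstep, hkey, PySem.Dict.get?_setdefault_self]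
        cases h : d.get? "ORF_frame" <;> simp [pvScan, hgc, hkey]
      · rw [hstep, PySem.Dict.get?_setdefault_of_ne d (pvVal p) (Ne.symm hkey)]
        cases h : d.get? "ORF_frame" <;> simp [pvScan, hgc, hkey]
    · have hg' : PySem.Str.isIn "=" p = false := by
        simpa using hg
      have hstep : pvStep d p = d := by
        unfold pvStep
        rw [hg']
        simp
      rw [hstep]
      have hgc : PySem.Chars.isIn ['='] p.toList = false := by simpa using hg
      cases h : d.get? "ORF_frame" <;> simp [pvScan, hgc]

theorem pvLoopA_eq_scan (parts : List String) :
    pvLoopA parts = match pvScan parts with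
      | none => none
      | some v => PySem.Int.ofStr? v := by
  induction parts with
  | nil => simp [pvLoopA, pvScan]
  | cons p r ih =>
    by_cases hg : PySem.Str.startswith p "ORF_frame=" = true
    · have h := (pvGuard_iff p).mp hg
      have hcond : PySem.Str.isIn "=" p = true ∧ pvKey p = "ORF_frame" := ⟨h.1, h.2⟩
      simp only [pvLoopA, if_pos hg, pvScan, if_pos hcond]
      rfl
    · have h : ¬ (PySem.Str.isIn "=" p = true ∧ pvKey p = "ORF_frame") := by
        intro hc
        exact hg ((pvGuard_iff p).mpr ⟨hc.1, hc.2⟩)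
      simp only [pvLoopA, if_neg hg, pvScan, if_neg h]
      exact ih

-- ===== VERDICT (by name: the statement is the Claim_ definition above) =====
theorem parse_orf_frame_spec : Claim_equal_parse_orf_frame := by
  intro description _
  unfold Spec_parse_orf_frame parse_orf_frame parse_orf_frame_alt
  rw [pvFold_get, PySem.Dict.get?_empty, pvLoopA_eq_scan]
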